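-- pv_equiv track=rewrite | github.com/julianandrews/flopferret | flopferret/main_window.py | _get_card_strings
-- ===== SOURCE A (Python) =====
-- def _get_card_strings(s):
--     stripped = s.replace(' ', '')
--     card_strings = [stripped[i:i+2].capitalize()
--                     for i in range(0, len(stripped) - 1, 2)]
--     if any(card_strings.count(x) > 1 for x in card_strings):
--         return None
--     else:
--         return card_strings
-- ===== SOURCE B (Python) =====
-- def _get_card_strings(s):
--     it = iter(s.replace(' ', ''))
--     seen = set()
--     cards = []
--     for a, b in zip(it, it):
--         card = a.upper() + b.lower()
--         if card in seen:
--             return None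
--         seen.add(card)
--         cards.append(card)
--     return cards
-- ===== Notes on version B (the rewrite author's own statement) =====
-- stated objective: faster
-- what changed: B replaces A's build-all-slices comprehension followed by a quadratic count-based duplicate scan with a single pairwise pass (zip over one iterator) that keeps a running seen set and returns None at the first repeated card.
import Mathlib
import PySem

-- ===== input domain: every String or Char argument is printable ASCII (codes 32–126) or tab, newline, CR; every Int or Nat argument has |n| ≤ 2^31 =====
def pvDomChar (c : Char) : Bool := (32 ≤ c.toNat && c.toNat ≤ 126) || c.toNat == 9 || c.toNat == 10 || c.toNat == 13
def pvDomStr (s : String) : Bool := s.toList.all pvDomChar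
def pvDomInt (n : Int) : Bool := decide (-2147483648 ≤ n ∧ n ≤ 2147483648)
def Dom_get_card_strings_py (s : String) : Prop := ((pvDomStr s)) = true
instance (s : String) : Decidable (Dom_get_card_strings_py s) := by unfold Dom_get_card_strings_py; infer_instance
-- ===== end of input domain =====

-- B fuses A's slice comprehension and its count-based duplicate scan into one pairwise
-- pass with a running seen set and an early exit.

-- ===== PORT A =====
-- str.capitalize: first char uppercased, the rest lowercased (exact on the ASCII domain)
def pvCap (cs : List Char) : List Char :=
  match cs with
  | [] => []
  | c :: rest => PySem.Chars.upperChar c :: rest.map PySem.Chars.lowerChar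

def get_card_strings_py (s : String) : Option (List String) :=
  let stripped := (PySem.Str.replace s " " "").toList
  let card_strings := (PySem.List.pyRange 0 ((stripped.length : Int) - 1) 2).map
    (fun i => String.mk (pvCap (PySem.List.slice stripped (some i) (some (i + 2)))))
  if card_strings.any (fun x => card_strings.count x > 1) then none
  else some card_strings

-- ===== PORT B =====
-- the 'for a, b in zip(it, it)' loop: consume two chars at a time, a trailing odd char dropped
def pvPairLoop (cs : List Char) (seen : PySem.Set String) (cards : List String) :
    Option (List String) :=
  match cs with
  | a :: b :: rest =>
    let card := String.mk [PySem.Chars.upperChar a, PySem.Chars.lowerChar b]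
    if PySem.Set.contains seen card then none
    else pvPairLoop rest (PySem.Set.add seen card) (cards ++ [card])
  | _ => some cards

def get_card_strings_py_alt (s : String) : Option (List String) :=
  pvPairLoop (PySem.Str.replace s " " "").toList PySem.Set.empty []

-- ===== PRECONDITION & SPEC =====
def Spec_get_card_strings_py (s : String) (out : Option (List String)) : Prop := out = get_card_strings_py_alt s
instance (s : String) (out : Option (List String)) : Decidable (Spec_get_card_strings_py s out) := by unfold Spec_get_card_strings_py; infer_instance

-- ===== CLAIM (what is proved, stated in full; the proofs are below) =====
def Claim_equal_get_card_strings_py : Prop := ∀ (s : String), Dom_get_card_strings_py s → Spec_get_card_strings_py s (get_card_strings_py s)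

-- ===== LEMMAS AND PROOFS =====

-- the list of capitalized 2-char cards both programs produce
def pvPairs : List Char → List String
  | a :: b :: rest =>
      String.mk [PySem.Chars.upperChar a, PySem.Chars.lowerChar b] :: pvPairs rest
  | _ => []

-- A's per-index slice, reduced to drop/take, and the whole comprehension to pvPairs
theorem pvDropForm (cs : List Char) :
    (List.range (cs.length / 2)).map
      (fun k => String.mk (pvCap ((cs.drop (2 * k)).take 2))) = pvPairs cs := by
  induction cs using pvPairs.induct with
  | case1 a b rest ih =>
      have hlen : (a :: b :: rest).length / 2 = rest.length / 2 + 1 := by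
        simp only [List.length_cons]; omega
      rw [hlen, List.range_succ_eq_map, List.map_cons, List.map_map]
      simp only [pvPairs]
      refine congrArg₂ List.cons ?_ ?_
      · simp [pvCap]
      · rw [← ih]
        apply List.map_congr_left
        intro k _
        simp only [Function.comp_apply]
        have h2 : 2 * (k + 1) = 2 * k + 1 + 1 := by ring
        simp only [Nat.succ_eq_add_one, h2, List.drop_succ_cons]
  | case2 x hx =>
      match x with
      | [] => simp [pvPairs]
      | [a] => simp [pvPairs]
      | a :: b :: rest => exact (hx a b rest rfl).elim

theorem pvRangeForm (cs : List Char) :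
    (List.range (cs.length / 2)).map
      (fun k => String.mk (pvCap (PySem.List.slice cs (some ((2 * k : Nat) : Int))
        (some (((2 * k : Nat) : Int) + 2))))) = pvPairs cs := by
  rw [← pvDropForm]
  apply List.map_congr_left
  intro k _
  have h1 : ((2 * k : Nat) : Int) + 2 = ((2 * k + 2 : Nat) : Int) := by push_cast; ring
  rw [h1, PySem.List.slice_natCast, Nat.add_sub_cancel_left]

-- range(0, len-1, 2) is the Nat range of the pair indices
theorem pvRangeBridge (cs : List Char) :
    PySem.List.pyRange 0 ((cs.length : Int) - 1) 2 =
      (List.range (cs.length / 2)).map (fun k => ((2 * k : Nat) : Int)) := by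
  rw [PySem.List.pyRange_of_pos 0 ((cs.length : Int) - 1) (by norm_num : (0:Int) < 2)]
  have hcnt : (if (0:Int) < (cs.length : Int) - 1
      then (((cs.length : Int) - 1 - 0 + 2 - 1) / 2).toNat else 0) = cs.length / 2 := by
    split_ifs with h <;> omega
  rw [hcnt]
  apply List.map_congr_left
  intro k _
  push_cast
  ring

theorem pvMapForm (cs : List Char) :
    (PySem.List.pyRange 0 ((cs.length : Int) - 1) 2).map
      (fun i => String.mk (pvCap (PySem.List.slice cs (some i) (some (i + 2))))) = pvPairs cs := by
  rw [pvRangeBridge, List.map_map]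
  exact pvRangeForm cs

-- A's any/count duplicate test detects exactly ¬Nodup
theorem pvAnyCount (l : List String) :
    (l.any (fun x => l.count x > 1)) = true ↔ ¬ l.Nodup := by
  simp only [List.any_eq_true, decide_eq_true_eq, List.nodup_iff_count_le_one]
  push Not
  constructor
  · rintro ⟨x, _, hx⟩; exact ⟨x, hx⟩
  · rintro ⟨x, hx⟩; exact ⟨x, List.count_pos_iff.mp (by omega), hx⟩

-- B's loop returns some (cards ++ pairs) iff the pairs are fresh and mutually distinct
theorem pvPairLoop_spec (cs : List Char) : ∀ (seen : PySem.Set String) (cards : List String),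
    pvPairLoop cs seen cards =
      if (pvPairs cs).Nodup ∧ ∀ x ∈ pvPairs cs, x ∉ seen
      then some (cards ++ pvPairs cs) else none := by
  induction cs using pvPairs.induct with
  | case1 a b rest ih =>
      intro seen cards
      simp only [pvPairLoop, pvPairs]
      by_cases h : (String.mk [PySem.Chars.upperChar a, PySem.Chars.lowerChar b]) ∈ seen
      · simp [PySem.Set.contains, h]
      · rw [if_neg (by simp [PySem.Set.contains, h]), ih]
        by_cases hc : (pvPairs rest).Nodup ∧
            (String.mk [PySem.Chars.upperChar a, PySem.Chars.lowerChar b]) ∉ pvPairs rest ∧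
            ∀ x ∈ pvPairs rest, x ∉ seen
        · rw [if_pos, if_pos]
          · simp
          · simp only [List.nodup_cons, List.mem_cons]
            exact ⟨⟨hc.2.1, hc.1⟩, fun x hx => hx.elim (fun he => he ▸ h) (fun hm => hc.2.2 x hm)⟩
          · refine ⟨hc.1, ?_⟩
            intro x hx
            simp only [PySem.Set.mem_add]
            rintro (h1 | h2)
            · exact hc.2.2 x hx h1
            · exact hc.2.1 (h2 ▸ hx)
        · rw [if_neg, if_neg]
          · intro ⟨h1, h2⟩
            simp only [List.nodup_cons] at h1
            exact hc ⟨h1.2, h1.1, fun x hx => h2 x (List.mem_cons_of_mem _ hx)⟩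
          · intro ⟨h1, h2⟩
            apply hc
            refine ⟨h1, ?_, ?_⟩
            · intro hmem
              exact (h2 _ hmem) (by simp [PySem.Set.mem_add])
            · intro x hx hxs
              exact (h2 x hx) (by simp [PySem.Set.mem_add, hxs])
  | case2 x hx =>
      intro seen cards
      match x with
      | [] => simp [pvPairLoop, pvPairs]
      | [a] => simp [pvPairLoop, pvPairs]
      | a :: b :: rest => exact (hx a b rest rfl).elim

-- ===== VERDICT (by name: the statement is the Claim_ definition above) =====
theorem get_card_strings_py_spec : Claim_equal_get_card_strings_py := by
  intro s _
  unfold Spec_get_card_strings_py get_card_strings_py get_card_strings_py_alt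
  simp only [pvMapForm, pvPairLoop_spec]
  by_cases h : (pvPairs (PySem.Str.replace s " " "").toList).Nodup
  · rw [if_neg (fun hb => (pvAnyCount _).mp hb h),
        if_pos ⟨h, by intro x _ hx; simp [PySem.Set.empty] at hx⟩, List.nil_append]
  · rw [if_pos ((pvAnyCount _).mpr h), if_neg (fun hc => h hc.1)]
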